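-- pv_equiv track=rewrite | github.com/rondeitch/ex12 | ex12_utils.py | is_valid_path
-- ===== SOURCE A (Python) =====
-- POSSIBLE_MOVES = {"u": (0, -1), "r": (1, 0), "d": (0, 1), "l": (-1, 0), "ur": (1, -1), "dr": (1, 1), "dl": (-1, 1),
--                   "ul": (-1, -1)}
--
-- def _is_valid_move(board, path, index):
--     """
--     Checks if the move is valid.
--     :param board: List[List[Any]]
--     :param path: List[Tuple[int, int]]
--     :param index: int
--     :return: bool
--     """
--     if _is_valid_cell(board, path[index]):
--         if index == 0:
--             return True
--         elif index > 0:
--             if path[index] in path[:index] or (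
--                     path[index - 1][0] - path[index][0],
--                     path[index - 1][1] - path[index][1]) in POSSIBLE_MOVES.values():
--                 return True
--     return False
--
-- def is_valid_path(board, path, words):
--     """
--     Checks if the path is valid, and if the word that suites it is in words.
--     :param board:  List[List[Any]]
--     :param path:  List[Tuple[int, int]]
--     :param words: List[str]
--     :return: Optional[str]
--     """
--     word = ''
--     for i, cord in enumerate(path):
--         if not _is_valid_move(board, path, i):
--             return None
--         word += str(board[cord[0]][cord[1]])
--     if word in words:
--         return word
--     return None
--
-- def _is_valid_cell(board, cord):
--     """
--     Checks if the cell is in the board range.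
--     :param board: List[List[str]]
--     :param cord: Tuple[int, int]
--     :return: bool
--     """
--     x, y = cord
--     if 0 <= x < len(board) and 0 <= y < len(board[0]):
--         return True
--     return False
-- ===== SOURCE B (Python) =====
-- KING_MOVES = {(0, -1), (1, 0), (0, 1), (-1, 0), (1, -1), (1, 1), (-1, 1), (-1, -1)}
--
--
-- def is_valid_path(board, path, words):
--     if not all(0 <= x < len(board) and 0 <= y < len(board[0]) for x, y in path):
--         return None
--     if not all((px - x, py - y) in KING_MOVES for (px, py), (x, y) in zip(path, path[1:])):
--         return None
--     word = ''.join(str(board[x][y]) for x, y in path)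
--     return word if word in words else None
-- ===== Notes on version B (the rewrite author's own statement) =====
-- stated objective: simpler
-- what changed: Replaces A's index-threaded per-cell helper (which re-slices path[:i] and grows the word inside the validation loop) by staged passes: one bounds pass over the cells, one pairwise king-move pass over zip(path, path[1:]), then word extraction and lookup; Pre_ excludes ragged boards where a path cell passes A's len(board[0]) bound but its own row is shorter, since Python A can raise IndexError there.
-- intended difference: On in-bounds paths whose every step is a king move or a revisit, with at least one revisited cell reached by a non-king step (e.g. standing still), and whose word is in words, A returns the word because 'path[i] in path[:i]' bypasses the adjacency check, while B returns None; B's is intended since revisiting a cell should not relax adjacency. — e.g. on is_valid_path([["a", "b", "c"]], [(0, 0), (0, 1), (0, 2), (0, 0)], ["abca"]): A returns some "abca", B returns none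
-- outside the precondition, e.g. on is_valid_path([['a', 'b'], ['c']], [(5, 5), (1, 1)], []): A returns None, B returns None
import Mathlib
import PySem

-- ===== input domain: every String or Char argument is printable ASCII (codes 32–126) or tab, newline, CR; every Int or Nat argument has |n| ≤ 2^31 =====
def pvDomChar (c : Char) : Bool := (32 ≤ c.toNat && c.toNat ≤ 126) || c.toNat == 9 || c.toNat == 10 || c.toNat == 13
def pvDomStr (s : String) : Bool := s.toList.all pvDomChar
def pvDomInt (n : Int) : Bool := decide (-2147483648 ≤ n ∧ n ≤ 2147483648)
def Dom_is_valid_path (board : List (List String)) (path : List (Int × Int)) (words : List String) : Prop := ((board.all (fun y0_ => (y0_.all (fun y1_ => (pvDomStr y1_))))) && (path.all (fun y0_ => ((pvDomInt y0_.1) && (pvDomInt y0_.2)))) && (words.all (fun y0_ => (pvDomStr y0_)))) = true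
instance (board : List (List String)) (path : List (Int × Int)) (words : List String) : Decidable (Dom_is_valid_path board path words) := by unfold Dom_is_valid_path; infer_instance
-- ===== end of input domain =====

-- B replaces A's index-threaded per-cell helper (re-slicing path[:i] each step) by staged passes
-- (bounds pass, pairwise king-move pass, then extraction); B drops A's revisit escape from the
-- adjacency check — that intended difference is stated in D_ below.


-- ===== PORT A =====
-- POSSIBLE_MOVES.values() (the dict is only ever consulted through .values(), in insertion order)
def POSSIBLE_MOVES_vals : List (Int × Int) :=
  [(0, -1), (1, 0), (0, 1), (-1, 0), (1, -1), (1, 1), (-1, 1), (-1, -1)]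

-- board[c.1][c.2]; exact whenever Python does not raise: both indices are nonnegative and in
-- range at every evaluation admitted by Pre_ (the bounds check passed and the row is long enough)
def pyCell (board : List (List String)) (c : Int × Int) : String :=
  ((PySem.List.pyGet? ((PySem.List.pyGet? board c.1).getD []) c.2).getD "")

-- _is_valid_cell; the inner len(board[0]) is reached only with len(board) > 0 (Python short-circuit),
-- where board.head?.getD [] is exactly board[0]
def is_valid_cell_A (board : List (List String)) (cord : Int × Int) : Bool :=
  if 0 ≤ cord.1 ∧ cord.1 < (board.length : Int) then
    decide (0 ≤ cord.2 ∧ cord.2 < ((board.head?.getD []).length : Int))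
  else false

-- _is_valid_move; path[index] / path[index-1] are in range at every call site (index enumerates path)
def is_valid_move_A (board : List (List String)) (path : List (Int × Int)) (index : Nat) : Bool :=
  let cur := path.getD index (0, 0)
  if is_valid_cell_A board cur then
    if index = 0 then true
    else
      decide (cur ∈ path.take index) ||
        decide (((path.getD (index - 1) (0, 0)).1 - cur.1,
                 (path.getD (index - 1) (0, 0)).2 - cur.2) ∈ POSSIBLE_MOVES_vals)
  else false

-- the 'for i, cord in enumerate(path)' loop, threading the word accumulator
def loopA (board : List (List String)) (path : List (Int × Int)) :
    List (Int × Int) → Nat → String → Option String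
  | [], _, word => some word
  | cord :: rest, i, word =>
    if is_valid_move_A board path i then
      loopA board path rest (i + 1) (word ++ pyCell board cord)
    else none

def is_valid_path (board : List (List String)) (path : List (Int × Int)) (words : List String) :
    Option String :=
  match loopA board path path 0 "" with
  | none => none
  | some word => if word ∈ words then some word else none

-- ===== PORT B =====
def KING_MOVES : PySem.Set (Int × Int) :=
  PySem.Set.ofList [(0, -1), (1, 0), (0, 1), (-1, 0), (1, -1), (1, 1), (-1, 1), (-1, -1)]

-- Source B: staged passes — bounds over the cells, king move over zip(path, path[1:]), then extraction;
-- len(board[0]) is reached only with 0 <= x < len(board) (short-circuit), where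
-- board.head?.getD [] is exactly board[0]; path[1:] is path.drop 1
def is_valid_path_alt (board : List (List String)) (path : List (Int × Int)) (words : List String) :
    Option String :=
  if path.all (fun c =>
      decide (0 ≤ c.1 ∧ c.1 < (board.length : Int) ∧
              0 ≤ c.2 ∧ c.2 < ((board.head?.getD []).length : Int))) then
    if (path.zip (path.drop 1)).all
        (fun pc => decide ((pc.1.1 - pc.2.1, pc.1.2 - pc.2.2) ∈ KING_MOVES)) then
      let word := PySem.Str.join "" (path.map (fun c => pyCell board c))
      if word ∈ words then some word else none
    else none
  else none

-- ===== PRECONDITION & SPEC =====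
-- Pre_ excludes paths containing a cell that passes A's bounds check (0<=x<len(board), 0<=y<len(board[0]))
-- but whose own row is too short (y >= len(board[x]), a ragged board): there Python A can raise IndexError
-- at board[x][y]; it thereby also excludes such inputs on which A's validation fails before the bad cell is
-- indexed, where A returns None (see cites).
def Pre_is_valid_path (board : List (List String)) (path : List (Int × Int)) (words : List String) : Prop :=
  ∀ c ∈ path,
    (0 ≤ c.1 ∧ c.1 < (board.length : Int) ∧ 0 ≤ c.2 ∧ c.2 < ((board.head?.getD []).length : Int)) →
      c.2 < ((board.getD c.1.toNat []).length : Int)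

instance (board : List (List String)) (path : List (Int × Int)) (words : List String) :
    Decidable (Pre_is_valid_path board path words) := by unfold Pre_is_valid_path; infer_instance

def pvWitness_is_valid_path : List (List String) × (List (Int × Int)) × List String :=
  ([["a", "b"], ["c", "d"]], [(0, 0), (0, 1)], ["ab"])

-- D_'s vocabulary, phrased directly on the input:
-- cell i of the path (out-of-range reads give a dummy, unused under D_'s bounds clause)
def cellAt (path : List (Int × Int)) (i : Nat) : Int × Int := path.getD i (0, 0)

-- the difference of the two cells is one of the 8 king-move offsets
def adjStep (p c : Int × Int) : Prop := p - c ∈ POSSIBLE_MOVES_vals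

-- consecutive cells i and i+1 of the path are a king move apart
def stepAt (path : List (Int × Int)) (i : Nat) : Prop := adjStep (cellAt path i) (cellAt path (i + 1))

-- cell i+1 of the path already occurred at some position ≤ i
def seenAgain (path : List (Int × Int)) (i : Nat) : Prop := cellAt path (i + 1) ∈ path.take (i + 1)

-- On in-bounds paths whose every step is a king move or a revisit, but not all king moves, and whose
-- word is in words, A returns the word ('path[i] in path[:i]' bypasses the adjacency check) while B
-- returns None; B's is intended: revisiting a cell should not relax adjacency.
def D_is_valid_path (board : List (List String)) (path : List (Int × Int)) (words : List String) : Prop :=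
  path.all (is_valid_cell_A board) = true ∧
  (∀ i < path.length - 1, seenAgain path i ∨ stepAt path i) ∧
  (¬ ∀ i < path.length - 1, stepAt path i) ∧
  ∃ w ∈ words, w.toList = path.flatMap fun q => (pyCell board q).toList

instance (board : List (List String)) (path : List (Int × Int)) (words : List String) :
    Decidable (D_is_valid_path board path words) := by
  unfold D_is_valid_path stepAt adjStep seenAgain cellAt; infer_instance

def Spec_is_valid_path (board : List (List String)) (path : List (Int × Int)) (words : List String) (out : Option String) : Prop := ¬ D_is_valid_path board path words → out = is_valid_path_alt board path words
instance (board : List (List String)) (path : List (Int × Int)) (words : List String) (out : Option String) : Decidable (Spec_is_valid_path board path words out) := by unfold Spec_is_valid_path; infer_instance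

def pvDiffWitness_is_valid_path : List (List String) × (List (Int × Int)) × List String :=
  ([["a", "b", "c"]], [(0, 0), (0, 1), (0, 2), (0, 0)], ["abca"])

def pvDiffWitnessOut_is_valid_path : (Option String) × (Option String) := (some "abca", none)

-- ===== CLAIM (what is proved, stated in full; the proofs are below) =====
def Claim_unchanged_is_valid_path : Prop := ∀ (board : List (List String)) (path : List (Int × Int)) (words : List String), Dom_is_valid_path board path words → Pre_is_valid_path board path words → Spec_is_valid_path board path words (is_valid_path board path words)
def Claim_changed_is_valid_path : Prop := Dom_is_valid_path (pvDiffWitness_is_valid_path.1) (pvDiffWitness_is_valid_path.2.1) (pvDiffWitness_is_valid_path.2.2) ∧ Pre_is_valid_path (pvDiffWitness_is_valid_path.1) (pvDiffWitness_is_valid_path.2.1) (pvDiffWitness_is_valid_path.2.2) ∧ D_is_valid_path (pvDiffWitness_is_valid_path.1) (pvDiffWitness_is_valid_path.2.1) (pvDiffWitness_is_valid_path.2.2) ∧ is_valid_path (pvDiffWitness_is_valid_path.1) (pvDiffWitness_is_valid_path.2.1) (pvDiffWitness_is_valid_path.2.2) = pvDiffWitnessOut_is_valid_path.1 ∧ is_valid_path_alt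 (pvDiffWitness_is_valid_path.1) (pvDiffWitness_is_valid_path.2.1) (pvDiffWitness_is_valid_path.2.2) = pvDiffWitnessOut_is_valid_path.2 ∧ pvDiffWitnessOut_is_valid_path.1 ≠ pvDiffWitnessOut_is_valid_path.2
def Claim_exact_is_valid_path : Prop := ∀ (board : List (List String)) (path : List (Int × Int)) (words : List String), Dom_is_valid_path board path words → Pre_is_valid_path board path words → D_is_valid_path board path words → is_valid_path board path words ≠ is_valid_path_alt board path words

-- ===== LEMMAS AND PROOFS =====

theorem str_eq_of_toList {a b : String} (h : a.toList = b.toList) : a = b := by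
  have := congrArg String.ofList h
  simpa using this

theorem join_empty_nil : PySem.Str.join "" ([] : List String) = "" := by
  apply str_eq_of_toList
  simp [PySem.Str.toList_join, PySem.Chars.join_nil]

theorem join_empty_cons (s : String) (l : List String) :
    PySem.Str.join "" (s :: l) = s ++ PySem.Str.join "" l := by
  apply str_eq_of_toList
  cases l with
  | nil => simp [PySem.Str.toList_join, PySem.Chars.join_nil]
  | cons t l' => simp [PySem.Str.toList_join, PySem.Chars.join_cons_cons]

-- A's bounds check, as a proposition (proof-layer vocabulary only)
def cellInB (board : List (List String)) (c : Int × Int) : Prop :=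
  0 ≤ c.1 ∧ c.1 < (board.length : Int) ∧ 0 ≤ c.2 ∧ c.2 < ((board.head?.getD []).length : Int)

theorem cell_char (board : List (List String)) (c : Int × Int) :
    is_valid_cell_A board c = true ↔ cellInB board c := by
  unfold is_valid_cell_A cellInB
  split_ifs with h
  · simp; tauto
  · simp; tauto

theorem bounds1_iff (board : List (List String)) (path : List (Int × Int)) :
    (path.all (is_valid_cell_A board) = true) ↔ ∀ c ∈ path, cellInB board c := by
  rw [List.all_eq_true]
  exact ⟨fun h c hc => (cell_char board c).mp (h c hc),
         fun h c hc => (cell_char board c).mpr (h c hc)⟩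

theorem adj_iff (p c : Int × Int) :
    adjStep p c ↔ (p.1 - c.1, p.2 - c.2) ∈ POSSIBLE_MOVES_vals := by
  unfold adjStep
  rw [show p - c = (p.1 - c.1, p.2 - c.2) from rfl]

theorem chars_join_nil_flatten : ∀ ls : List (List Char), PySem.Chars.join [] ls = ls.flatten
  | [] => by simp [PySem.Chars.join_nil]
  | [a] => by simp [PySem.Chars.join_singleton]
  | a :: b :: t => by
    rw [PySem.Chars.join_cons_cons]
    simp [chars_join_nil_flatten (b :: t)]

-- D_'s word clause equals the ports' word lookup
theorem word_mem_iff (board : List (List String)) (path : List (Int × Int)) (words : List String) :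
    (∃ w ∈ words, w.toList = path.flatMap (fun q => (pyCell board q).toList)) ↔
      PySem.Str.join "" (path.map (fun c => pyCell board c)) ∈ words := by
  have hflat : path.flatMap (fun q => (pyCell board q).toList)
      = (PySem.Str.join "" (path.map (fun c => pyCell board c))).toList := by
    rw [List.flatMap_def, PySem.Str.toList_join, List.map_map]
    rw [show ("" : String).toList = [] from rfl, chars_join_nil_flatten]
    rfl
  constructor
  · rintro ⟨w, hw, hs⟩
    have hweq : w = PySem.Str.join "" (path.map (fun c => pyCell board c)) :=
      str_eq_of_toList (by rw [hs, hflat])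
    rwa [← hweq]
  · intro hmem
    exact ⟨_, hmem, hflat.symm⟩

-- A's validation loop characterised: it returns the appended word iff every remaining index is a valid move
theorem loopA_char (board : List (List String)) (path : List (Int × Int)) :
    ∀ (rest : List (Int × Int)) (k : Nat) (w : String),
      loopA board path rest k w =
        if ∀ i, i < rest.length → is_valid_move_A board path (k + i) = true then
          some (w ++ PySem.Str.join "" (rest.map (fun c => pyCell board c)))
        else none := by
  intro rest
  induction rest with
  | nil =>
    intro k w
    simp [loopA, join_empty_nil]
  | cons c rest' ih =>
    intro k w
    by_cases hm : is_valid_move_A board path k = true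
    · rw [show loopA board path (c :: rest') k w
            = loopA board path rest' (k + 1) (w ++ pyCell board c) by simp [loopA, hm]]
      rw [ih (k + 1) (w ++ pyCell board c)]
      by_cases hall : ∀ i, i < rest'.length → is_valid_move_A board path (k + 1 + i) = true
      · rw [if_pos hall, if_pos ?_]
        · simp [join_empty_cons, String.append_assoc]
        · intro i hi
          cases i with
          | zero => simpa using hm
          | succ j =>
            have := hall j (by simpa using hi)
            have harith : k + 1 + j = k + (j + 1) := by omega
            rwa [harith] at this
      · rw [if_neg hall, if_neg ?_]
        intro hcon
        apply hall
        intro i hi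
        have := hcon (i + 1) (by simpa using Nat.succ_lt_succ hi)
        have harith : k + (i + 1) = k + 1 + i := by omega
        rwa [harith] at this
    · rw [show loopA board path (c :: rest') k w = none by simp [loopA, hm]]
      rw [if_neg ?_]
      intro hcon
      exact hm (by simpa using hcon 0 (by simp))

-- A's per-index validity, as bounds plus (revisit or king move) on the preceding pair
theorem allValid_char (board : List (List String)) (path : List (Int × Int)) :
    (∀ i, i < path.length → is_valid_move_A board path i = true) ↔
      ((∀ c ∈ path, cellInB board c) ∧
       ∀ i, i < path.length - 1 → seenAgain path i ∨ stepAt path i) := by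
  constructor
  · intro h
    constructor
    · intro c hc
      obtain ⟨j, hj, rfl⟩ := List.mem_iff_getElem.mp hc
      have hv := h j hj
      unfold is_valid_move_A at hv
      rw [List.getD_eq_getElem?_getD, List.getElem?_eq_getElem hj] at hv
      simp only [Option.getD_some] at hv
      by_cases hcell : is_valid_cell_A board path[j] = true
      · exact (cell_char board _).mp hcell
      · rw [Bool.not_eq_true] at hcell; rw [hcell] at hv; simp at hv
    · intro i hi
      have hv := h (i + 1) (by omega)
      unfold is_valid_move_A at hv
      simp only [Nat.add_sub_cancel] at hv
      by_cases hcell : is_valid_cell_A board (path.getD (i + 1) (0, 0)) = true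
      · rw [hcell] at hv
        simp only [if_true, Nat.succ_ne_zero, if_false, Bool.or_eq_true, decide_eq_true_eq] at hv
        unfold seenAgain stepAt cellAt
        rw [adj_iff]
        exact hv
      · rw [Bool.not_eq_true] at hcell; rw [hcell] at hv; simp at hv
  · rintro ⟨hcells, hpairs⟩ i hi
    have hmemi : path.getD i (0, 0) ∈ path := by
      rw [List.getD_eq_getElem?_getD, List.getElem?_eq_getElem hi]
      exact List.getElem_mem hi
    have hcell : is_valid_cell_A board (path.getD i (0, 0)) = true :=
      (cell_char board _).mpr (hcells _ hmemi)
    cases i with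
    | zero => simpa [is_valid_move_A, List.getD_eq_getElem?_getD] using hcell
    | succ j =>
      have hp := hpairs j (by omega)
      unfold seenAgain stepAt cellAt at hp
      rw [adj_iff] at hp
      simp only [is_valid_move_A, hcell, if_true, Nat.succ_ne_zero, if_false,
                 Nat.add_sub_cancel, Bool.or_eq_true, decide_eq_true_eq]
      tauto

-- B's zip pass, characterised by indices
theorem zip_all_char (path : List (Int × Int)) (f : (Int × Int) × (Int × Int) → Bool) :
    (path.zip (path.drop 1)).all f = true ↔
      ∀ i, i < path.length - 1 → f (path.getD i (0, 0), path.getD (i + 1) (0, 0)) = true := by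
  rw [List.all_eq_true]
  constructor
  · intro h i hi
    have hi1 : i < path.length := by omega
    have hi2 : i + 1 < path.length := by omega
    have hlen : i < (path.zip (path.drop 1)).length := by
      simp [List.length_zip]; omega
    have hz : (path.zip (path.drop 1))[i] = (path[i], (path.drop 1)[i]'(by simp; omega)) :=
      List.getElem_zip ..
    have hd : (path.drop 1)[i]'(by simp; omega) = path[i + 1]'hi2 := by
      rw [List.getElem_drop]; congr 1; omega
    have hmem : (path[i], path[i + 1]'hi2) ∈ path.zip (path.drop 1) := by
      rw [← hd, ← hz]; exact List.getElem_mem hlen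
    have := h _ hmem
    rw [List.getD_eq_getElem?_getD, List.getElem?_eq_getElem hi1,
        List.getD_eq_getElem?_getD, List.getElem?_eq_getElem hi2]
    simpa using this
  · intro h x hx
    obtain ⟨j, hj, rfl⟩ := List.mem_iff_getElem.mp hx
    have hjlen : j < path.length - 1 := by
      simpa [List.length_zip] using hj
    have hj1 : j < path.length := by omega
    have hj2 : j + 1 < path.length := by omega
    have hz : (path.zip (path.drop 1))[j] = (path[j], (path.drop 1)[j]'(by simp; omega)) :=
      List.getElem_zip ..
    have hd : (path.drop 1)[j]'(by simp; omega) = path[j + 1]'hj2 := by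
      rw [List.getElem_drop]; congr 1; omega
    have := h j hjlen
    rw [List.getD_eq_getElem?_getD, List.getElem?_eq_getElem hj1,
        List.getD_eq_getElem?_getD, List.getElem?_eq_getElem hj2] at this
    rw [hz, hd]
    simpa using this

theorem king_mem_iff (p c : Int × Int) :
    ((p.1 - c.1, p.2 - c.2) ∈ KING_MOVES) ↔ adjStep p c := by
  rw [adj_iff]
  rw [show KING_MOVES = PySem.Set.ofList POSSIBLE_MOVES_vals from by decide]
  exact PySem.Set.mem_ofList ..

-- B's first pass as a proposition
theorem bounds_all_char (board : List (List String)) (path : List (Int × Int)) :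
    (path.all (fun c =>
        decide (0 ≤ c.1 ∧ c.1 < (board.length : Int) ∧
                0 ≤ c.2 ∧ c.2 < ((board.head?.getD []).length : Int))) = true) ↔
      ∀ c ∈ path, cellInB board c := by
  rw [List.all_eq_true]
  unfold cellInB
  simp

-- ===== VERDICT (by name: the statement is the Claim_ definition above) =====
theorem is_valid_path_spec : Claim_unchanged_is_valid_path := by
  intro board path words _ hPre
  unfold Spec_is_valid_path
  intro hnD
  unfold is_valid_path is_valid_path_alt
  rw [loopA_char board path path 0 ""]
  simp only [Nat.zero_add]
  by_cases hV : ∀ i, i < path.length → is_valid_move_A board path i = true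
  · obtain ⟨hcells, hpairs⟩ := (allValid_char board path).mp hV
    rw [if_pos hV, if_pos ((bounds_all_char board path).mpr hcells)]
    by_cases hK : ∀ i, i < path.length - 1 → stepAt path i
    · rw [if_pos ((zip_all_char path _).mpr (fun i hi => by
        simpa [king_mem_iff, stepAt, cellAt] using hK i hi))]
      simp [String.empty_append]
    · push_neg at hK
      obtain ⟨i, hi, hnk⟩ := hK
      rw [if_neg (fun hcon => hnk (by
        have := (zip_all_char path _).mp hcon i hi
        simpa [king_mem_iff, stepAt, cellAt] using this))]
      have hword : PySem.Str.join "" (path.map (fun c => pyCell board c)) ∉ words := by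
        intro hw
        exact hnD ⟨(bounds1_iff board path).mpr hcells, hpairs,
          fun hall => hnk (hall i hi), (word_mem_iff board path words).mpr hw⟩
      simp [String.empty_append, hword]
  · rw [if_neg hV]
    have hnot := (not_iff_not.mpr (allValid_char board path)).mp hV
    by_cases hcells : ∀ c ∈ path, cellInB board c
    · rw [if_pos ((bounds_all_char board path).mpr hcells)]
      have hpairs : ¬ ∀ i, i < path.length - 1 → seenAgain path i ∨ stepAt path i := by
        intro h; exact hnot ⟨hcells, h⟩
      push_neg at hpairs
      obtain ⟨i, hi, hbad⟩ := hpairs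
      rw [if_neg (fun hcon => hbad.2 (by
        have := (zip_all_char path _).mp hcon i hi
        simpa [king_mem_iff, stepAt, cellAt] using this))]
    · rw [if_neg (fun hcon => hcells ((bounds_all_char board path).mp hcon))]

theorem is_valid_path_changed : Claim_changed_is_valid_path := by
  unfold Claim_changed_is_valid_path; decide

theorem is_valid_path_tight : Claim_exact_is_valid_path := by
  intro board path words _ hPre hD
  obtain ⟨hb1, hpairs, hnall, hword0⟩ := hD
  push_neg at hnall
  obtain ⟨i, hi, hnk⟩ := hnall
  have hcells : ∀ c ∈ path, cellInB board c := (bounds1_iff board path).mp hb1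
  have hword : PySem.Str.join "" (path.map (fun c => pyCell board c)) ∈ words :=
    (word_mem_iff board path words).mp hword0
  unfold is_valid_path is_valid_path_alt
  rw [loopA_char board path path 0 ""]
  simp only [Nat.zero_add]
  rw [if_pos ((allValid_char board path).mpr ⟨hcells, hpairs⟩)]
  rw [if_pos ((bounds_all_char board path).mpr hcells)]
  rw [if_neg (fun hcon => hnk (by
    have := (zip_all_char path _).mp hcon i hi
    simpa [king_mem_iff, stepAt, cellAt] using this))]
  simp [String.empty_append, hword]
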